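-- pv_equiv track=rewrite | github.com/The1Rogue/AlgebraForSec | main.py | cmpMagnitude
-- ===== SOURCE A (Python) =====
-- def padArray(x, y):
--     #If they already have the same length skip the function
--     if (len(x) != len(y)):
--         #For the amount of digits in the greater array loop and add 0's to the smaller array
--         for i in range(max(len(x), len(y))+1):
--             if len(x) < i:
--                 x.insert(1, 0)
--             if len(y) < i:
--                 y.insert(1, 0)
--     return x, y
--
-- def cmpMagnitude(x, y):
--     x,y=padArray(x,y)
--     for i in range(1, len(x)):
--         if x[i] > y[i]:
--             return '>'
--         if x[i] < y[i]:
--             return '<'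
--     return '='
-- ===== SOURCE B (Python) =====
-- def cmpMagnitude(x, y):
--     # Single pass: compare virtual digits at positions 1..n-1 of the
--     # zero-padded arrays (padding goes right after the slot-0 element),
--     # without building the padded arrays or mutating the inputs.
--     n = max(len(x), len(y))
--     for i in range(1, n):
--         jx = i - (n - len(x))
--         jy = i - (n - len(y))
--         a = x[jx] if 1 <= jx < len(x) else 0
--         b = y[jy] if 1 <= jy < len(y) else 0
--         if a > b:
--             return '>'
--         if a < b:
--             return '<'
--     return '='
-- ===== Notes on version B (the rewrite author's own statement) =====
-- stated objective: alternative
-- what changed: B replaces padArray's mutating insert-at-1 padding loop plus a second compare loop over the built lists with a single index-arithmetic pass that reads the virtual zero-padded digit at each position directly, never building padded lists or mutating the inputs.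
import Mathlib
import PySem

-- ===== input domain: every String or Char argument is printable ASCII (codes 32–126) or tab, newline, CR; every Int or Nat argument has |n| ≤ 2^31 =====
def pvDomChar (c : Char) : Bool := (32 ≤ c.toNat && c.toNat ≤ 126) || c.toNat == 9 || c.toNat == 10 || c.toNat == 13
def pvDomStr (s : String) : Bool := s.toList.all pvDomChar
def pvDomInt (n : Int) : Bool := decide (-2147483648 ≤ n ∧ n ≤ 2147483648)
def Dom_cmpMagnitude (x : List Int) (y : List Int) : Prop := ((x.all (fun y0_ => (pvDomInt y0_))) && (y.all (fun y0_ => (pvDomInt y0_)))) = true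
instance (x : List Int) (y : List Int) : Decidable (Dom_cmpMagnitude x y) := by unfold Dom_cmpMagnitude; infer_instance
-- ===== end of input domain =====

-- B replaces A's mutating insert-at-1 padding pass + compare loop over the built lists
-- with a single index-arithmetic compare pass that never builds the padded lists;
-- equivalence is about the RETURN value only (Python A mutates its list arguments
-- in place, B does not).
-- ===== PORT A =====
-- Faithful port of padArray: mutating insert-at-1 padding loop (return value only;
-- the Python A mutates its arguments in place, B does not — equivalence is about the return value).
def padArray (x : List Int) (y : List Int) : List Int × List Int :=
  if x.length ≠ y.length then
    (List.range (max x.length y.length + 1)).foldl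
      (fun (st : List Int × List Int) (i : Nat) =>
        let a := if st.1.length < i then PySem.List.insert st.1 1 0 else st.1
        let b := if st.2.length < i then PySem.List.insert st.2 1 0 else st.2
        (a, b)) (x, y)
  else (x, y)

-- for i in range(1, len(x)): compare x[i], y[i]
def cmpLoopA (px : List Int) (py : List Int) (i : Nat) : String :=
  if i < px.length then
    match PySem.List.pyGet? px (i : Int), PySem.List.pyGet? py (i : Int) with
    | some a, some b =>
        if a > b then ">" else if a < b then "<" else cmpLoopA px py (i + 1)
    | _, _ => "="  -- unreachable: padArray leaves equal lengths (Python would raise IndexError)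
  else "="
termination_by px.length - i

def cmpMagnitude (x : List Int) (y : List Int) : String :=
  let p := padArray x y
  cmpLoopA p.1 p.2 1

-- ===== PORT B =====
-- virtual digit of the zero-padded array at position i (1 <= jx < len guard, exact)
def digitAt (z : List Int) (n : Nat) (i : Nat) : Int :=
  let j : Int := (i : Int) - ((n : Int) - (z.length : Int))
  if 1 ≤ j ∧ j < (z.length : Int) then (PySem.List.pyGet? z j).getD 0 else 0

def cmpLoopB (x : List Int) (y : List Int) (n : Nat) (i : Nat) : String :=
  if i < n then
    let a := digitAt x n i
    let b := digitAt y n i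
    if a > b then ">" else if a < b then "<" else cmpLoopB x y n (i + 1)
  else "="
termination_by n - i

def cmpMagnitude_alt (x : List Int) (y : List Int) : String :=
  cmpLoopB x y (max x.length y.length) 1

-- ===== PRECONDITION & SPEC =====
def Spec_cmpMagnitude (x : List Int) (y : List Int) (out : String) : Prop := out = cmpMagnitude_alt x y
instance (x : List Int) (y : List Int) (out : String) : Decidable (Spec_cmpMagnitude x y out) := by unfold Spec_cmpMagnitude; infer_instance

-- ===== CLAIM (what is proved, stated in full; the proofs are below) =====
def Claim_equal_cmpMagnitude : Prop := ∀ (x : List Int) (y : List Int), Dom_cmpMagnitude x y → Spec_cmpMagnitude x y (cmpMagnitude x y)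

-- ===== LEMMAS AND PROOFS =====

-- the padded list A's loop actually compares
def padTo (z : List Int) (n : Nat) : List Int :=
  match z with
  | [] => List.replicate n 0
  | h :: t => h :: (List.replicate (n - (t.length + 1)) 0 ++ t)

theorem length_padTo (z : List Int) (n : Nat) (h : z.length ≤ n) :
    (padTo z n).length = n := by
  cases z with
  | nil => simp [padTo]
  | cons a t => simp [padTo]; simp at h; omega

theorem padTo_self (z : List Int) : padTo z z.length = z := by
  cases z with
  | nil => simp [padTo]
  | cons a t => simp [padTo]

theorem insert_padTo (z : List Int) (k : Nat) (h : z.length ≤ k) :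
    PySem.List.insert (padTo z k) 1 0 = padTo z (k + 1) := by
  cases z with
  | nil =>
    cases k with
    | zero => decide
    | succ k =>
      show PySem.List.insert (List.replicate (k + 1) 0) 1 0 = List.replicate (k + 2) 0
      rw [PySem.List.insert_ofNat _ _ _ (by simp)]
      simp [List.replicate_succ]
  | cons a t =>
    simp only [padTo]
    rw [PySem.List.insert_ofNat _ _ _ (by simp)]
    simp only [List.length_cons] at h
    have e : k + 1 - (t.length + 1) = (k - (t.length + 1)) + 1 := by omega
    simp [e, List.replicate_succ]

theorem fold_padArray (x y : List Int) (k : Nat) :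
    (List.range k).foldl
      (fun (st : List Int × List Int) (i : Nat) =>
        let a := if st.1.length < i then PySem.List.insert st.1 1 0 else st.1
        let b := if st.2.length < i then PySem.List.insert st.2 1 0 else st.2
        (a, b)) (x, y)
    = (padTo x (max x.length (k - 1)), padTo y (max y.length (k - 1))) := by
  induction k with
  | zero => simp [padTo_self]
  | succ k ih =>
    rw [List.range_succ, List.foldl_append, ih]
    simp only [List.foldl_cons, List.foldl_nil]
    have hx := length_padTo x (max x.length (k - 1)) (le_max_left _ _)
    have hy := length_padTo y (max y.length (k - 1)) (le_max_left _ _)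
    rw [hx, hy]
    by_cases h1 : max x.length (k - 1) < k
    · rw [if_pos h1, insert_padTo x _ (le_max_left _ _)]
      have e : max x.length (k - 1) + 1 = max x.length (k + 1 - 1) := by omega
      rw [e]
      by_cases h2 : max y.length (k - 1) < k
      · rw [if_pos h2, insert_padTo y _ (le_max_left _ _)]
        have e2 : max y.length (k - 1) + 1 = max y.length (k + 1 - 1) := by omega
        rw [e2]
      · rw [if_neg h2]
        have e2 : max y.length (k - 1) = max y.length (k + 1 - 1) := by omega
        rw [e2]
    · rw [if_neg h1]
      have e : max x.length (k - 1) = max x.length (k + 1 - 1) := by omega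
      rw [e]
      by_cases h2 : max y.length (k - 1) < k
      · rw [if_pos h2, insert_padTo y _ (le_max_left _ _)]
        have e2 : max y.length (k - 1) + 1 = max y.length (k + 1 - 1) := by omega
        rw [e2]
      · rw [if_neg h2]
        have e2 : max y.length (k - 1) = max y.length (k + 1 - 1) := by omega
        rw [e2]

theorem padArray_eq (x y : List Int) :
    padArray x y = (padTo x (max x.length y.length), padTo y (max x.length y.length)) := by
  unfold padArray
  by_cases h : x.length ≠ y.length
  · rw [if_pos h, fold_padArray]
    have e1 : max x.length (max x.length y.length + 1 - 1) = max x.length y.length := by omega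
    have e2 : max y.length (max x.length y.length + 1 - 1) = max x.length y.length := by omega
    rw [e1, e2]
  · rw [if_neg h]
    simp only [not_not] at h
    have e1 : max x.length y.length = x.length := by omega
    rw [e1, padTo_self, h, padTo_self]

theorem padTo_get (z : List Int) (n i : Nat) (h1 : 1 ≤ i) (h2 : i < n)
    (hm : z.length ≤ n) :
    PySem.List.pyGet? (padTo z n) (i : Int) = some (digitAt z n i) := by
  rw [PySem.List.pyGet?_natCast]
  cases z with
  | nil =>
    have hg : ¬ (1 ≤ (i : Int) - ((n : Int) - (([] : List Int).length : Int)) ∧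
        (i : Int) - ((n : Int) - (([] : List Int).length : Int)) < (([] : List Int).length : Int)) := by
      simp; omega
    simp only [digitAt, if_neg hg, padTo]
    simp [h2]
  | cons a t =>
    obtain ⟨j, rfl⟩ : ∃ j, i = j + 1 := ⟨i - 1, by omega⟩
    simp only [padTo, List.getElem?_cons_succ]
    simp only [List.length_cons] at hm
    by_cases hj : j < n - (t.length + 1)
    · have hg : ¬ (1 ≤ ((j + 1 : Nat) : Int) - ((n : Int) - (((a :: t) : List Int).length : Int)) ∧
          ((j + 1 : Nat) : Int) - ((n : Int) - (((a :: t) : List Int).length : Int)) < (((a :: t) : List Int).length : Int)) := by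
        simp only [List.length_cons]
        push_cast
        omega
      simp only [digitAt, if_neg hg]
      rw [List.getElem?_append_left (by simpa using hj)]
      simp [hj]
    · have hq : 1 ≤ ((j + 1 : Nat) : Int) - ((n : Int) - (((a :: t) : List Int).length : Int)) ∧
          ((j + 1 : Nat) : Int) - ((n : Int) - (((a :: t) : List Int).length : Int)) < (((a :: t) : List Int).length : Int) := by
        simp only [List.length_cons]
        push_cast
        omega
      simp only [digitAt, if_pos hq]
      rw [List.getElem?_append_right (by simp; omega)]
      have hge : (0 : Int) ≤ ((j + 1 : Nat) : Int) - ((n : Int) - (((a :: t) : List Int).length : Int)) := by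
        simp only [List.length_cons]
        push_cast
        omega
      rw [PySem.List.pyGet?_of_nonneg _ hge]
      have et : ((((j + 1 : Nat) : Int) - ((n : Int) - (((a :: t) : List Int).length : Int))).toNat)
          = j + 1 - (n - (t.length + 1)) := by
        simp only [List.length_cons]
        push_cast
        omega
      rw [et]
      obtain ⟨k, hk⟩ : ∃ k, j + 1 - (n - (t.length + 1)) = k + 1 :=
        ⟨j - (n - (t.length + 1)), by omega⟩
      rw [hk]
      simp only [List.getElem?_cons_succ]
      rw [List.getElem?_eq_getElem (l := t) (by simp; omega),
        List.getElem?_eq_getElem (l := t) (by omega)]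
      simp only [Option.getD_some, Option.some.injEq]
      congr 1
      simp
      omega

theorem loop_eq (x y : List Int) (n : Nat) (hx : x.length ≤ n) (hy : y.length ≤ n)
    (i : Nat) (hi : 1 ≤ i) :
    cmpLoopA (padTo x n) (padTo y n) i = cmpLoopB x y n i := by
  have main : ∀ (d i : Nat), 1 ≤ i → n ≤ i + d →
      cmpLoopA (padTo x n) (padTo y n) i = cmpLoopB x y n i := by
    intro d
    induction d with
    | zero =>
      intro i h1 h2
      rw [cmpLoopA, cmpLoopB, length_padTo x n hx]
      rw [if_neg (by omega), if_neg (by omega)]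
    | succ d ih =>
      intro i h1 h2
      rw [cmpLoopA, cmpLoopB, length_padTo x n hx]
      by_cases h : i < n
      · rw [if_pos h, if_pos h]
        rw [padTo_get x n i h1 h hx, padTo_get y n i h1 h hy]
        dsimp only
        split_ifs with hgt hlt
        · rfl
        · rfl
        · exact ih (i + 1) (by omega) (by omega)
      · rw [if_neg h, if_neg h]
  exact main (n - i) i hi (by omega)

-- ===== VERDICT =====
theorem cmpMagnitude_spec : Claim_equal_cmpMagnitude := by
  intro x y _
  unfold Spec_cmpMagnitude cmpMagnitude cmpMagnitude_alt
  rw [padArray_eq]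
  exact loop_eq x y _ (le_max_left _ _) (le_max_right _ _) 1 le_rfl
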